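-- pv_equiv track=rewrite | github.com/GrigoryM1A1/ASD-AGH-2022 | dp_greedy/zaba_zbigniew.py | it_is_wednesday_my_dudes
-- ===== SOURCE A (Python) =====
-- def it_is_wednesday_my_dudes(A):
--     n = len(A)
--     m = sum(A)
--     m = max(m, m - n)
--     inf = float('inf')
--     F = [[inf for i in range(m)] for j in range(n)]
--     F[0][A[0]] = 0
--
--     for i in range(1, n):
--         for j in range(m):
--             for k in range(i):
--                 if m - (i - k) > j - A[i] >= 0:
--                     F[i][j] = min(F[i][j], F[k][j + (i - k) - A[i]] + 1)
--
--     min_ = inf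
--     for i in range(m):
--         if F[n-1][i] < min_:
--             min_ = F[n-1][i]
--     if min_ == inf:
--         return -1
--
--     return min_
-- ===== SOURCE B (Python) =====
-- def it_is_wednesday_my_dudes(A):
--     # Same frog-jump DP, but the O(i) inner predecessor scan is replaced by a
--     # running minimum over each anti-diagonal t = position + energy_index,
--     # kept in a dict; rows are produced one at a time.
--     n = len(A)
--     m = sum(A)
--     inf = float('inf')
--     row = [inf] * m
--     row[A[0]] = 0
--     diag = {}
--     last = row
--     for i in range(1, n):
--         for j in range(m):
--             v = last[j]
--             if v < diag.get(j + (i - 1), inf):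
--                 diag[j + (i - 1)] = v
--         last = [diag.get(j + i - A[i], inf) + 1 if j >= A[i] else inf
--                 for j in range(m)]
--     best = min(last)
--     return -1 if best == inf else best
-- ===== Notes on version B (the rewrite author's own statement) =====
-- stated objective: faster
-- what changed: The O(i) inner loop over all predecessor rows k is removed: a dict keeps the running minimum of F[k][j'] along each anti-diagonal t = k + j', so each cell is filled from one dict lookup instead of a scan over k.
import Mathlib
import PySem

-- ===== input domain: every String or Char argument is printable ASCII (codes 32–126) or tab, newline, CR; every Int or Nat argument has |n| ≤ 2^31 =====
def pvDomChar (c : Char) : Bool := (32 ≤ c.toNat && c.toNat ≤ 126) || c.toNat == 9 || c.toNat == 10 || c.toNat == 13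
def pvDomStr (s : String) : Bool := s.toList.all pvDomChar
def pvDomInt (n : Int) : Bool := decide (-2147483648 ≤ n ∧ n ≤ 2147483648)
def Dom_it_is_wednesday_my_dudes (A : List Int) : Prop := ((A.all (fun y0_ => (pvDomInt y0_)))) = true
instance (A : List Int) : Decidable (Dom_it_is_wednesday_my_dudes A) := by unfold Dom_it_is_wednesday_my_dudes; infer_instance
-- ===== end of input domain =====

-- B replaces A's O(i) inner scan over predecessor rows by a running minimum per
-- anti-diagonal (position + energy index) kept in a dict, turning the cubic-in-rows
-- table fill into one pass per row (objective: faster).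
-- float('inf') is modelled as (none : Option Int); finite DP values as (some v).

def omin (a b : Option Int) : Option Int :=
  match a, b with
  | none, b => b
  | some x, none => some x
  | some x, some y => some (min x y)

def olt (a b : Option Int) : Bool :=
  match a, b with
  | none, _ => false
  | some _, none => true
  | some x, some y => decide (x < y)

def oadd1 (a : Option Int) : Option Int := a.map (fun x => x + 1)

-- ===== PORT A =====
def it_is_wednesday_my_dudes (A : List Int) : Int :=
  let n : Int := A.length
  let msum : Int := A.sum
  let m : Int := max msum (msum - n)
  let F0 : List (List (Option Int)) :=
    (PySem.List.pyRange 0 n 1).map (fun _ =>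
      (PySem.List.pyRange 0 m 1).map (fun _ => (none : Option Int)))
  -- F[0][A[0]] = 0  (Python list assignment, incl. negative-index wrap, via pySetD)
  let F1 : List (List (Option Int)) :=
    PySem.List.pySetD F0 0
      (PySem.List.pySetD (PySem.List.pyGetD F0 0 []) (PySem.List.pyGetD A 0 0) (some 0))
  let F2 : List (List (Option Int)) :=
    (PySem.List.pyRange 1 n 1).foldl (fun F i =>
      (PySem.List.pyRange 0 m 1).foldl (fun F j =>
        let ai := PySem.List.pyGetD A i 0
        let v := (PySem.List.pyRange 0 i 1).foldl (fun acc k =>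
            if m - (i - k) > j - ai ∧ j - ai ≥ 0 then
              omin acc (oadd1 (PySem.List.pyGetD (PySem.List.pyGetD F k []) (j + (i - k) - ai) none))
            else acc) (PySem.List.pyGetD (PySem.List.pyGetD F i []) j none)
        PySem.List.pySetD F i (PySem.List.pySetD (PySem.List.pyGetD F i []) j v)) F) F1
  let lastRow := PySem.List.pyGetD F2 (n - 1) []
  let minv := (PySem.List.pyRange 0 m 1).foldl (fun acc i =>
      if olt (PySem.List.pyGetD lastRow i none) acc then PySem.List.pyGetD lastRow i none
      else acc) none
  match minv with
  | none => -1
  | some v => v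

-- ===== PORT B =====
def it_is_wednesday_my_dudes_alt (A : List Int) : Int :=
  let n : Int := A.length
  let m : Int := A.sum
  let row : List (Option Int) :=
    PySem.List.pySetD (List.replicate m.toNat (none : Option Int))
      (PySem.List.pyGetD A 0 0) (some 0)
  let st : List (Option Int) × PySem.Dict Int Int :=
    (PySem.List.pyRange 1 n 1).foldl (fun st i =>
      let last := st.1
      let diag := (PySem.List.pyRange 0 m 1).foldl (fun d j =>
          match PySem.List.pyGetD last j none with
          | none => d
          | some x =>
            if olt (some x) (PySem.Dict.get? d (j + (i - 1))) then
              PySem.Dict.insert d (j + (i - 1)) x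
            else d) st.2
      let ai := PySem.List.pyGetD A i 0
      let cur := (PySem.List.pyRange 0 m 1).map (fun j =>
          if ai ≤ j then oadd1 (PySem.Dict.get? diag (j + i - ai)) else none)
      (cur, diag)) (row, PySem.Dict.empty)
  let best := st.1.foldl omin none
  match best with
  | none => -1
  | some v => v

-- ===== PRECONDITION & SPEC =====
-- Pre_ is exactly where the Python A returns normally: on empty A, non-positive
-- sum(A), or A[0] outside Python's index range [-sum(A), sum(A)) the seeding line
-- F[0][A[0]] = 0 (resp. the empty table) raises IndexError.
def Pre_it_is_wednesday_my_dudes (A : List Int) : Prop :=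
  A ≠ [] ∧ 0 < A.sum ∧ -A.sum ≤ A.headD 0 ∧ A.headD 0 < A.sum
instance (A : List Int) : Decidable (Pre_it_is_wednesday_my_dudes A) := by
  unfold Pre_it_is_wednesday_my_dudes; infer_instance

def pvWitness_it_is_wednesday_my_dudes : List Int := [2, 1]

def Spec_it_is_wednesday_my_dudes (A : List Int) (out : Int) : Prop := out = it_is_wednesday_my_dudes_alt A
instance (A : List Int) (out : Int) : Decidable (Spec_it_is_wednesday_my_dudes A out) := by unfold Spec_it_is_wednesday_my_dudes; infer_instance

-- ===== CLAIM (what is proved, stated in full; the proofs are below) =====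
def Claim_equal_it_is_wednesday_my_dudes : Prop := ∀ (A : List Int), Dom_it_is_wednesday_my_dudes A → Pre_it_is_wednesday_my_dudes A → Spec_it_is_wednesday_my_dudes A (it_is_wednesday_my_dudes A)

-- ===== LEMMAS AND PROOFS =====

-- The common model of the DP table: row 0 is the seeded row, row i+1 is computed
-- from the previous rows by A's cell formula.
def blankRow (m : Int) : List (Option Int) := List.replicate m.toNat (none : Option Int)

def seedRow (A : List Int) : List (Option Int) :=
  PySem.List.pySetD (blankRow A.sum) (PySem.List.pyGetD A 0 0) (some 0)

def cellOf (A : List Int) (prev : List (List (Option Int))) (i j : Int) : Option Int :=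
  (PySem.List.pyRange 0 i 1).foldl (fun acc k =>
    if A.sum - (i - k) > j - PySem.List.pyGetD A i 0 ∧ j - PySem.List.pyGetD A i 0 ≥ 0 then
      omin acc (oadd1 (PySem.List.pyGetD (PySem.List.pyGetD prev k [])
        (j + (i - k) - PySem.List.pyGetD A i 0) none))
    else acc) none

def newRowOf (A : List Int) (i : Int) (prev : List (List (Option Int))) : List (Option Int) :=
  (PySem.List.pyRange 0 A.sum 1).map (fun j => cellOf A prev i j)

def rowsList (A : List Int) : ℕ → List (List (Option Int))
  | 0 => [seedRow A]
  | i + 1 => rowsList A i ++ [newRowOf A ((i : Int) + 1) (rowsList A i)]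

def rowF (A : List Int) (i : ℕ) : List (Option Int) := (rowsList A i).getLastD []

def dminF (A : List Int) (i : ℕ) (t : Int) : Option Int :=
  (PySem.List.pyRange 0 (i : Int) 1).foldl (fun acc k =>
    if 0 ≤ t - k ∧ t - k < A.sum then
      omin acc (PySem.List.pyGetD (rowF A k.toNat) (t - k) none)
    else acc) none

theorem length_rowsList (A : List Int) (i : ℕ) : (rowsList A i).length = i + 1 := by
  induction i with
  | zero => rfl
  | succ i ih => simp [rowsList, ih]

theorem rowF_succ (A : List Int) (i : ℕ) :
    rowF A (i + 1) = newRowOf A ((i : Int) + 1) (rowsList A i) := by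
  simp [rowF, rowsList]

theorem rowsList_succ (A : List Int) (i : ℕ) :
    rowsList A (i + 1) = rowsList A i ++ [rowF A (i + 1)] := by
  rw [rowF_succ]; rfl

theorem getD_append_length {α : Type} (l1 : List α) (x : α) (l2 : List α) (d : α) :
    (l1 ++ x :: l2).getD l1.length d = x := by
  simp [List.getD]

theorem getD_append_left {α : Type} (l1 l2 : List α) (k : ℕ) (d : α) (h : k < l1.length) :
    (l1 ++ l2).getD k d = l1.getD k d := by
  simp [List.getD, List.getElem?_append_left h]

theorem set_append_length {α : Type} (l1 : List α) (x : α) (l2 : List α) (v : α) :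
    (l1 ++ x :: l2).set l1.length v = l1 ++ v :: l2 := by
  induction l1 with
  | nil => rfl
  | cons a t ih => simp [ih]

theorem set_append_of_length {α : Type} (l1 : List α) (x : α) (l2 : List α) (v : α)
    (nn : ℕ) (h : nn = l1.length) : (l1 ++ x :: l2).set nn v = l1 ++ v :: l2 := by
  subst h; exact set_append_length l1 x l2 v

theorem getD_rowsList (A : List Int) (i k : ℕ) (h : k ≤ i) :
    (rowsList A i).getD k [] = rowF A k := by
  induction i with
  | zero =>
    interval_cases k
    rfl
  | succ i ih =>
    rcases Nat.lt_or_ge k (i + 1) with hk | hk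
    · rw [rowsList_succ, getD_append_left _ _ _ _ (by simp [length_rowsList]; omega)]
      exact ih (by omega)
    · have : k = i + 1 := by omega
      subst this
      rw [rowsList_succ]
      have := getD_append_length (rowsList A i) (rowF A (i+1)) [] []
      rw [length_rowsList] at this
      exact this

theorem length_rowF (A : List Int) (i : ℕ) : (rowF A i).length = A.sum.toNat := by
  cases i with
  | zero => simp [rowF, rowsList, seedRow, blankRow, PySem.List.length_pySetD]
  | succ i =>
    rw [rowF_succ]
    simp [newRowOf, PySem.List.length_pyRange_one]

theorem oadd1_omin (a b : Option Int) : oadd1 (omin a b) = omin (oadd1 a) (oadd1 b) := by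
  cases a <;> cases b <;> simp [oadd1, omin]

theorem oadd1_foldl (l : List Int) (p : Int → Prop) [DecidablePred p]
    (g : Int → Option Int) (acc : Option Int) :
    l.foldl (fun a k => if p k then omin a (oadd1 (g k)) else a) (oadd1 acc)
      = oadd1 (l.foldl (fun a k => if p k then omin a (g k) else a) acc) := by
  induction l generalizing acc with
  | nil => rfl
  | cons x t ih =>
    simp only [List.foldl_cons]
    by_cases hx : p x
    · simp only [if_pos hx, ← oadd1_omin]; exact ih _
    · simp only [if_neg hx]; exact ih _

theorem foldl_fixed_of_id {α β : Type} (l : List β) (f : α → β → α) (init : α)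
    (h : ∀ x ∈ l, ∀ a, f a x = a) : l.foldl f init = init := by
  induction l generalizing init with
  | nil => rfl
  | cons x t ih =>
    rw [List.foldl_cons, h x (by simp)]
    exact ih init (fun y hy a => h y (by simp [hy]) a)

-- The heart: A's inner predecessor scan for cell (i, j), i = I+1, equals
-- "+1 of the anti-diagonal minimum at t = j + i - A[i]" (gated by j ≥ A[i]).
theorem cell_eq (A : List Int) (I : ℕ) (j : Int) :
    cellOf A (rowsList A I) ((I : Int) + 1) j =
      if PySem.List.pyGetD A ((I : Int) + 1) 0 ≤ j then
        oadd1 (dminF A (I + 1) (j + ((I : Int) + 1) - PySem.List.pyGetD A ((I : Int) + 1) 0))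
      else none := by
  unfold cellOf
  set ai := PySem.List.pyGetD A ((I : Int) + 1) 0 with hai
  by_cases hj : ai ≤ j
  · rw [if_pos hj]
    have hcongr : (PySem.List.pyRange 0 ((I : Int) + 1) 1).foldl (fun acc k =>
        if A.sum - (((I : Int) + 1) - k) > j - ai ∧ j - ai ≥ 0 then
          omin acc (oadd1 (PySem.List.pyGetD (PySem.List.pyGetD (rowsList A I) k [])
            (j + (((I : Int) + 1) - k) - ai) none))
        else acc) none
        = (PySem.List.pyRange 0 ((I : Int) + 1) 1).foldl (fun acc k =>
        if 0 ≤ (j + ((I : Int) + 1) - ai) - k ∧ (j + ((I : Int) + 1) - ai) - k < A.sum then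
          omin acc (oadd1 (PySem.List.pyGetD (rowF A k.toNat) ((j + ((I : Int) + 1) - ai) - k) none))
        else acc) none := by
      apply PySem.List.foldl_congr_mem
      intro acc k hk
      rw [PySem.List.mem_pyRange_one] at hk
      have hkc : k = ((k.toNat : ℕ) : Int) := by omega
      have hread : PySem.List.pyGetD (rowsList A I) k [] = rowF A k.toNat := by
        rw [hkc, PySem.List.pyGetD_natCast]
        exact getD_rowsList A I k.toNat (by omega)
      have hidx : j + (((I : Int) + 1) - k) - ai = (j + ((I : Int) + 1) - ai) - k := by ring
      have hiff : (A.sum - (((I : Int) + 1) - k) > j - ai ∧ j - ai ≥ 0) ↔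
          (0 ≤ (j + ((I : Int) + 1) - ai) - k ∧ (j + ((I : Int) + 1) - ai) - k < A.sum) := by
        omega
      rw [hidx, hread]
      exact if_congr hiff rfl rfl
    rw [hcongr]
    unfold dminF
    have hcast : ((I + 1 : ℕ) : Int) = (I : Int) + 1 := by push_cast; ring
    rw [hcast]
    exact oadd1_foldl (PySem.List.pyRange 0 ((I : Int) + 1) 1)
      (fun k => 0 ≤ (j + ((I : Int) + 1) - ai) - k ∧ (j + ((I : Int) + 1) - ai) - k < A.sum)
      (fun k => PySem.List.pyGetD (rowF A k.toNat) ((j + ((I : Int) + 1) - ai) - k) none) none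
  · rw [if_neg hj]
    apply foldl_fixed_of_id
    intro k hk acc
    rw [if_neg (by omega)]

theorem dict_fold_nat (last : List (Option Int)) (c : Int) (d : PySem.Dict Int Int)
    (M : ℕ) : ∀ t : Int,
    PySem.Dict.get? ((PySem.List.pyRange 0 (M : Int) 1).foldl (fun d j =>
        match PySem.List.pyGetD last j none with
        | none => d
        | some x =>
          if olt (some x) (PySem.Dict.get? d (j + c)) then PySem.Dict.insert d (j + c) x
          else d) d) t
      = if 0 ≤ t - c ∧ t - c < (M : Int) then
          omin (PySem.Dict.get? d t) (PySem.List.pyGetD last (t - c) none)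
        else PySem.Dict.get? d t := by
  induction M with
  | zero =>
    intro t
    rw [show ((0 : ℕ) : Int) = 0 from rfl, PySem.List.pyRange_one_eq_nil (le_refl 0),
      List.foldl_nil, if_neg (by omega)]
  | succ M ih =>
    intro t
    have hcast : ((M + 1 : ℕ) : Int) = (M : Int) + 1 := by push_cast; ring
    rw [hcast, PySem.List.pyRange_one_succ_right (a := 0) (b := (M : Int)) (by positivity),
      List.foldl_append, List.foldl_cons, List.foldl_nil]
    have hMc : PySem.Dict.get? ((PySem.List.pyRange 0 (M : Int) 1).foldl (fun d j =>
        match PySem.List.pyGetD last j none with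
        | none => d
        | some x =>
          if olt (some x) (PySem.Dict.get? d (j + c)) then PySem.Dict.insert d (j + c) x
          else d) d) ((M : Int) + c) = PySem.Dict.get? d ((M : Int) + c) := by
      rw [ih ((M : Int) + c), if_neg (by omega)]
    cases hv : PySem.List.pyGetD last (M : Int) none with
    | none =>
      rw [ih t]
      by_cases hM : t - c = (M : Int)
      · rw [if_neg (by omega), if_pos (by omega), hM, hv]
        cases PySem.Dict.get? d t <;> rfl
      · by_cases hcond : 0 ≤ t - c ∧ t - c < (M : Int)
        · rw [if_pos hcond, if_pos (by omega)]
        · rw [if_neg hcond, if_neg (by omega)]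
    | some x =>
      simp only [hMc]
      by_cases ht : t = (M : Int) + c
      · have htc : t - c = (M : Int) := by omega
        subst ht
        cases hdt : PySem.Dict.get? d ((M : Int) + c) with
        | none =>
          rw [if_pos (by simp [olt])]
          rw [PySem.Dict.get?_insert_self, if_pos (by omega), htc, hv]
          simp [omin]
        | some a =>
          by_cases hxa : x < a
          · rw [if_pos (by simp [olt, hxa])]
            rw [PySem.Dict.get?_insert_self, if_pos (by omega), htc, hv]
            simp [omin]
            omega
          · rw [if_neg (by simp [olt]; omega)]
            rw [ih _, if_neg (by omega), if_pos (by omega), htc, hv]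
            rw [hdt]
            simp [omin]
            omega
      · have hne : ¬ (0 ≤ t - c ∧ t - c < (M : Int) + 1) ∨ (0 ≤ t - c ∧ t - c < (M : Int)) := by omega
        have step : ∀ (d' : PySem.Dict Int Int),
            PySem.Dict.get? (if olt (some x) (PySem.Dict.get? d ((M : Int) + c)) then
              PySem.Dict.insert d' ((M : Int) + c) x else d') t
            = PySem.Dict.get? d' t := by
          intro d'
          split_ifs
          · exact PySem.Dict.get?_insert_of_ne d' x ht
          · rfl
        rw [step, ih t]
        by_cases hcond : 0 ≤ t - c ∧ t - c < (M : Int)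
        · rw [if_pos hcond, if_pos (by omega)]
        · rw [if_neg hcond, if_neg (by omega)]

-- One pass of B's diagonal update: its effect on every key of the dict.
theorem dict_fold (last : List (Option Int)) (c : Int) (d : PySem.Dict Int Int)
    (m : Int) (t : Int) :
    PySem.Dict.get? ((PySem.List.pyRange 0 m 1).foldl (fun d j =>
        match PySem.List.pyGetD last j none with
        | none => d
        | some x =>
          if olt (some x) (PySem.Dict.get? d (j + c)) then PySem.Dict.insert d (j + c) x
          else d) d) t
      = if 0 ≤ t - c ∧ t - c < m then
          omin (PySem.Dict.get? d t) (PySem.List.pyGetD last (t - c) none)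
        else PySem.Dict.get? d t := by
  rcases le_or_gt m 0 with hm | hm
  · rw [PySem.List.pyRange_one_eq_nil hm, List.foldl_nil, if_neg (by omega)]
  · have hmm : m = ((m.toNat : ℕ) : Int) := by omega
    rw [hmm]
    exact dict_fold_nat last c d m.toNat t

theorem dmin_succ (A : List Int) (I : ℕ) (t : Int) :
    dminF A (I + 1) t =
      if 0 ≤ t - (I : Int) ∧ t - (I : Int) < A.sum then
        omin (dminF A I t) (PySem.List.pyGetD (rowF A I) (t - (I : Int)) none)
      else dminF A I t := by
  unfold dminF
  have hcast : ((I + 1 : ℕ) : Int) = (I : Int) + 1 := by push_cast; ring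
  rw [hcast, PySem.List.pyRange_one_succ_right (a := 0) (b := (I : Int)) (by positivity),
    List.foldl_append, List.foldl_cons, List.foldl_nil, Int.toNat_natCast]

-- B's outer loop invariant: after iterations 1..I, last = row I and the dict is
-- the anti-diagonal minimum over rows 0..I-1... rows < I+1 read so far.
theorem B_inv (A : List Int) (I : ℕ) :
    ∃ d : PySem.Dict Int Int,
      (PySem.List.pyRange 1 ((I : Int) + 1) 1).foldl (fun st i =>
        let last := st.1
        let diag := (PySem.List.pyRange 0 A.sum 1).foldl (fun d j =>
            match PySem.List.pyGetD last j none with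
            | none => d
            | some x =>
              if olt (some x) (PySem.Dict.get? d (j + (i - 1))) then
                PySem.Dict.insert d (j + (i - 1)) x
              else d) st.2
        let ai := PySem.List.pyGetD A i 0
        let cur := (PySem.List.pyRange 0 A.sum 1).map (fun j =>
            if ai ≤ j then oadd1 (PySem.Dict.get? diag (j + i - ai)) else none)
        (cur, diag)) (seedRow A, PySem.Dict.empty)
      = (rowF A I, d) ∧ ∀ t, PySem.Dict.get? d t = dminF A I t := by
  induction I with
  | zero =>
    refine ⟨PySem.Dict.empty, ?_, ?_⟩
    · rw [show ((0 : ℕ) : Int) + 1 = 1 from by ring, PySem.List.pyRange_one_eq_nil (le_refl 1),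
        List.foldl_nil]
      rfl
    · intro t
      rfl
  | succ I ih =>
    obtain ⟨d, hd, hget⟩ := ih
    have hcast : ((I + 1 : ℕ) : Int) + 1 = ((I : Int) + 1) + 1 := by push_cast; ring
    rw [hcast, PySem.List.pyRange_one_succ_right (a := 1) (b := (I : Int) + 1) (by omega),
      List.foldl_append, hd, List.foldl_cons, List.foldl_nil]
    dsimp only
    rw [show ((I : Int) + 1 - 1) = (I : Int) from by ring]
    have hget' : ∀ t, PySem.Dict.get? ((PySem.List.pyRange 0 A.sum 1).foldl (fun d j =>
        match PySem.List.pyGetD (rowF A I) j none with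
        | none => d
        | some x =>
          if olt (some x) (PySem.Dict.get? d (j + (I : Int))) then
            PySem.Dict.insert d (j + (I : Int)) x
          else d) d) t = dminF A (I + 1) t := by
      intro t
      rw [dict_fold (rowF A I) (I : Int) d A.sum t, hget t, ← dmin_succ]
    refine ⟨_, ?_, hget'⟩
    have hcur : (PySem.List.pyRange 0 A.sum 1).map (fun j =>
        if PySem.List.pyGetD A ((I : Int) + 1) 0 ≤ j then
          oadd1 (PySem.Dict.get? ((PySem.List.pyRange 0 A.sum 1).foldl (fun d j =>
            match PySem.List.pyGetD (rowF A I) j none with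
            | none => d
            | some x =>
              if olt (some x) (PySem.Dict.get? d (j + (I : Int))) then
                PySem.Dict.insert d (j + (I : Int)) x
              else d) d) (j + ((I : Int) + 1) - PySem.List.pyGetD A ((I : Int) + 1) 0))
        else none) = rowF A (I + 1) := by
      rw [rowF_succ]
      unfold newRowOf
      apply List.map_congr_left
      intro j _
      rw [cell_eq A I j, hget']
    rw [hcur]

theorem A_row_partial (A : List Int) (I : ℕ) (rest : List (List (Option Int)))
    (J : ℕ) (hJ : (J : Int) ≤ A.sum) :
    (PySem.List.pyRange 0 (J : Int) 1).foldl (fun F j =>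
        let ai := PySem.List.pyGetD A ((I : Int) + 1) 0
        let v := (PySem.List.pyRange 0 ((I : Int) + 1) 1).foldl (fun acc k =>
            if A.sum - (((I : Int) + 1) - k) > j - ai ∧ j - ai ≥ 0 then
              omin acc (oadd1 (PySem.List.pyGetD (PySem.List.pyGetD F k [])
                (j + (((I : Int) + 1) - k) - ai) none))
            else acc) (PySem.List.pyGetD (PySem.List.pyGetD F ((I : Int) + 1) []) j none)
        PySem.List.pySetD F ((I : Int) + 1)
          (PySem.List.pySetD (PySem.List.pyGetD F ((I : Int) + 1) []) j v))
      (rowsList A I ++ blankRow A.sum :: rest)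
    = rowsList A I ++
        ((PySem.List.pyRange 0 (J : Int) 1).map (fun j => cellOf A (rowsList A I) ((I : Int) + 1) j)
          ++ List.replicate (A.sum.toNat - J) (none : Option Int)) :: rest := by
  induction J with
  | zero =>
    rw [show ((0 : ℕ) : Int) = 0 from rfl, PySem.List.pyRange_one_eq_nil (le_refl 0)]
    rfl
  | succ J ih =>
    have hJ' : (J : Int) ≤ A.sum := by omega
    have hJlt : J < A.sum.toNat := by omega
    have hcast : ((J + 1 : ℕ) : Int) = (J : Int) + 1 := by push_cast; ring
    rw [hcast, PySem.List.pyRange_one_succ_right (a := 0) (b := (J : Int)) (by positivity),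
      List.foldl_append, ih hJ', List.foldl_cons, List.foldl_nil]
    set prev := rowsList A I with hprev
    set mapJ := (PySem.List.pyRange 0 (J : Int) 1).map
        (fun j => cellOf A prev ((I : Int) + 1) j) with hmapJ
    have hmapJlen : mapJ.length = J := by
      rw [hmapJ, List.length_map, PySem.List.length_pyRange_one]; omega
    have hrep : A.sum.toNat - J = (A.sum.toNat - (J + 1)) + 1 := by omega
    have hrow : mapJ ++ List.replicate (A.sum.toNat - J) (none : Option Int)
        = mapJ ++ (none : Option Int) :: List.replicate (A.sum.toNat - (J + 1)) none := by
      rw [hrep, List.replicate_succ]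
    have hprevlen : prev.length = I + 1 := length_rowsList A I
    -- reading row I+1 of the partial table
    have hgetrow : PySem.List.pyGetD (prev ++ (mapJ ++ List.replicate (A.sum.toNat - J)
        (none : Option Int)) :: rest) ((I : Int) + 1) []
        = mapJ ++ List.replicate (A.sum.toNat - J) (none : Option Int) := by
      rw [show ((I : Int) + 1) = ((I + 1 : ℕ) : Int) from by push_cast; ring,
        PySem.List.pyGetD_natCast, ← hprevlen, getD_append_length]
    -- the current cell is still blank
    have hcell0 : PySem.List.pyGetD (mapJ ++ List.replicate (A.sum.toNat - J)
        (none : Option Int)) (J : Int) none = none := by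
      rw [hrow, PySem.List.pyGetD_natCast, ← hmapJlen, getD_append_length]
    -- the predecessor scan only reads the finished rows
    have hv : (PySem.List.pyRange 0 ((I : Int) + 1) 1).foldl (fun acc k =>
        if A.sum - (((I : Int) + 1) - k) > (J : Int) - PySem.List.pyGetD A ((I : Int) + 1) 0 ∧
            (J : Int) - PySem.List.pyGetD A ((I : Int) + 1) 0 ≥ 0 then
          omin acc (oadd1 (PySem.List.pyGetD (PySem.List.pyGetD (prev ++ (mapJ ++
            List.replicate (A.sum.toNat - J) (none : Option Int)) :: rest) k [])
            ((J : Int) + (((I : Int) + 1) - k) - PySem.List.pyGetD A ((I : Int) + 1) 0) none))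
        else acc) none
        = cellOf A prev ((I : Int) + 1) (J : Int) := by
      unfold cellOf
      apply PySem.List.foldl_congr_mem
      intro acc k hk
      rw [PySem.List.mem_pyRange_one] at hk
      have hread : PySem.List.pyGetD (prev ++ (mapJ ++ List.replicate (A.sum.toNat - J)
          (none : Option Int)) :: rest) k [] = PySem.List.pyGetD prev k [] := by
        rw [show k = ((k.toNat : ℕ) : Int) from by omega, PySem.List.pyGetD_natCast,
          PySem.List.pyGetD_natCast]
        exact getD_append_left prev _ k.toNat [] (by omega)
      rw [hread]
    dsimp only
    rw [hgetrow, hcell0, hv]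
    -- writing the cell
    have hset1 : PySem.List.pySetD (mapJ ++ List.replicate (A.sum.toNat - J)
        (none : Option Int)) (J : Int) (cellOf A prev ((I : Int) + 1) (J : Int))
        = (PySem.List.pyRange 0 ((J : Int) + 1) 1).map (fun j => cellOf A prev ((I : Int) + 1) j)
          ++ List.replicate (A.sum.toNat - (J + 1)) (none : Option Int) := by
      rw [hrow, PySem.List.pySetD_of_nonneg _ _ (by positivity), Int.toNat_natCast,
        set_append_of_length _ _ _ _ _ hmapJlen.symm,
        PySem.List.pyRange_one_succ_right (a := 0) (b := (J : Int)) (by positivity),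
        List.map_append, hmapJ]
      simp
    rw [hset1]
    have hset2 : PySem.List.pySetD (prev ++ (mapJ ++ List.replicate (A.sum.toNat - J)
        (none : Option Int)) :: rest) ((I : Int) + 1)
        ((PySem.List.pyRange 0 ((J : Int) + 1) 1).map (fun j => cellOf A prev ((I : Int) + 1) j)
          ++ List.replicate (A.sum.toNat - (J + 1)) (none : Option Int))
        = prev ++ ((PySem.List.pyRange 0 ((J : Int) + 1) 1).map
            (fun j => cellOf A prev ((I : Int) + 1) j)
          ++ List.replicate (A.sum.toNat - (J + 1)) (none : Option Int)) :: rest := by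
      rw [PySem.List.pySetD_of_nonneg _ _ (by positivity),
        show ((I : Int) + 1).toNat = prev.length from by omega, set_append_length]
    rw [hset2, PySem.List.pyRange_one_succ_right (a := 0) (b := (J : Int)) (by positivity)]

-- A's row fill (the j-loop) at i = I+1, acting on a table whose first I+1 rows are final.
theorem A_row (A : List Int) (I : ℕ) (rest : List (List (Option Int))) :
    (PySem.List.pyRange 0 A.sum 1).foldl (fun F j =>
        let ai := PySem.List.pyGetD A ((I : Int) + 1) 0
        let v := (PySem.List.pyRange 0 ((I : Int) + 1) 1).foldl (fun acc k =>
            if A.sum - (((I : Int) + 1) - k) > j - ai ∧ j - ai ≥ 0 then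
              omin acc (oadd1 (PySem.List.pyGetD (PySem.List.pyGetD F k [])
                (j + (((I : Int) + 1) - k) - ai) none))
            else acc) (PySem.List.pyGetD (PySem.List.pyGetD F ((I : Int) + 1) []) j none)
        PySem.List.pySetD F ((I : Int) + 1)
          (PySem.List.pySetD (PySem.List.pyGetD F ((I : Int) + 1) []) j v))
      (rowsList A I ++ blankRow A.sum :: rest)
    = rowsList A I ++ newRowOf A ((I : Int) + 1) (rowsList A I) :: rest := by
  rcases le_or_gt A.sum 0 with hm | hm
  · rw [PySem.List.pyRange_one_eq_nil hm, List.foldl_nil]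
    unfold newRowOf blankRow
    rw [PySem.List.pyRange_one_eq_nil hm, List.map_nil,
      show A.sum.toNat = 0 from by omega, List.replicate_zero]
  · have := A_row_partial A I rest A.sum.toNat (by omega)
    rw [show ((A.sum.toNat : ℕ) : Int) = A.sum from by omega] at this
    rw [this]
    unfold newRowOf
    simp

-- A's outer loop invariant.
theorem A_inv (A : List Int) (I : ℕ) (hI : I ≤ A.length - 1) :
    (PySem.List.pyRange 1 ((I : Int) + 1) 1).foldl (fun F i =>
      (PySem.List.pyRange 0 A.sum 1).foldl (fun F j =>
        let ai := PySem.List.pyGetD A i 0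
        let v := (PySem.List.pyRange 0 i 1).foldl (fun acc k =>
            if A.sum - (i - k) > j - ai ∧ j - ai ≥ 0 then
              omin acc (oadd1 (PySem.List.pyGetD (PySem.List.pyGetD F k []) (j + (i - k) - ai) none))
            else acc) (PySem.List.pyGetD (PySem.List.pyGetD F i []) j none)
        PySem.List.pySetD F i (PySem.List.pySetD (PySem.List.pyGetD F i []) j v)) F)
      (rowsList A 0 ++ List.replicate (A.length - 1) (blankRow A.sum))
    = rowsList A I ++ List.replicate (A.length - 1 - I) (blankRow A.sum) := by
  induction I with
  | zero =>
    rw [show ((0 : ℕ) : Int) + 1 = 1 from by ring, PySem.List.pyRange_one_eq_nil (le_refl 1),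
      List.foldl_nil, Nat.sub_zero]
  | succ I ih =>
    have hI' : I ≤ A.length - 1 := by omega
    have hcast : ((I + 1 : ℕ) : Int) + 1 = ((I : Int) + 1) + 1 := by push_cast; ring
    rw [hcast, PySem.List.pyRange_one_succ_right (a := 1) (b := (I : Int) + 1) (by omega),
      List.foldl_append, ih hI', List.foldl_cons, List.foldl_nil]
    have hrep : A.length - 1 - I = (A.length - 1 - (I + 1)) + 1 := by omega
    rw [hrep, List.replicate_succ]
    have := A_row A I (List.replicate (A.length - 1 - (I + 1)) (blankRow A.sum))
    rw [this, rowsList_succ, rowF_succ]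
    simp

theorem if_olt_eq_omin (a v : Option Int) : (if olt v a then v else a) = omin a v := by
  cases a with
  | none => cases v <;> simp [olt, omin]
  | some y =>
    cases v with
    | none => simp [olt, omin]
    | some x =>
      simp only [olt, omin, decide_eq_true_eq, min_def]
      split_ifs <;> first | rfl | (exfalso; omega)

theorem min_fold_eq (xs : List (Option Int)) :
    (PySem.List.pyRange 0 ((xs.length : ℕ) : Int) 1).foldl (fun acc i =>
      if olt (PySem.List.pyGetD xs i none) acc then PySem.List.pyGetD xs i none else acc) none
    = xs.foldl omin none := by
  rw [← PySem.List.foldl_pyRange_zero_pyGetD' xs none omin none]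
  apply PySem.List.foldl_congr_mem
  intro acc j _
  exact if_olt_eq_omin acc (PySem.List.pyGetD xs j none)

theorem A_val (A : List Int) (hne : A ≠ []) (hm : 0 < A.sum) :
    it_is_wednesday_my_dudes A =
      match (rowF A (A.length - 1)).foldl omin none with
      | none => -1
      | some v => v := by
  have hn : 1 ≤ A.length := by
    cases A with
    | nil => exact absurd rfl hne
    | cons a t => simp
  unfold it_is_wednesday_my_dudes
  dsimp only
  rw [max_eq_left (by omega)]
  have hF0 : (PySem.List.pyRange 0 (A.length : Int) 1).map (fun _ =>
      (PySem.List.pyRange 0 A.sum 1).map (fun _ => (none : Option Int)))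
      = List.replicate A.length (blankRow A.sum) := by
    simp [List.map_const', PySem.List.length_pyRange_one, blankRow]
  rw [hF0, show A.length = (A.length - 1) + 1 from by omega, List.replicate_succ]
  rw [show (A.length - 1) + 1 = A.length from by omega]
  have hF1 : PySem.List.pySetD (blankRow A.sum :: List.replicate (A.length - 1) (blankRow A.sum)) 0
      (PySem.List.pySetD (PySem.List.pyGetD (blankRow A.sum ::
        List.replicate (A.length - 1) (blankRow A.sum)) 0 [])
        (PySem.List.pyGetD A 0 0) (some 0))
      = rowsList A 0 ++ List.replicate (A.length - 1) (blankRow A.sum) := by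
    rw [PySem.List.pyGetD_zero_cons, PySem.List.pySetD_of_nonneg _ _ (le_refl 0)]
    rfl
  rw [hF1]
  have hcast : ((A.length - 1 : ℕ) : Int) + 1 = (A.length : Int) := by omega
  have hAinv := A_inv A (A.length - 1) (le_refl _)
  rw [hcast] at hAinv
  rw [hAinv, Nat.sub_self, List.replicate_zero, List.append_nil]
  rw [show (A.length : Int) - 1 = ((A.length - 1 : ℕ) : Int) from by omega,
    PySem.List.pyGetD_natCast, getD_rowsList A (A.length - 1) (A.length - 1) (le_refl _)]
  rw [show A.sum = (((rowF A (A.length - 1)).length : ℕ) : Int) from by rw [length_rowF]; omega]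
  rw [min_fold_eq (rowF A (A.length - 1))]

theorem B_val (A : List Int) (hne : A ≠ []) :
    it_is_wednesday_my_dudes_alt A =
      match (rowF A (A.length - 1)).foldl omin none with
      | none => -1
      | some v => v := by
  have hn : 1 ≤ A.length := by
    cases A with
    | nil => exact absurd rfl hne
    | cons a t => simp
  unfold it_is_wednesday_my_dudes_alt
  dsimp only
  rw [show PySem.List.pySetD (List.replicate A.sum.toNat (none : Option Int))
    (PySem.List.pyGetD A 0 0) (some 0) = seedRow A from rfl]
  obtain ⟨d, hd, -⟩ := B_inv A (A.length - 1)
  have hcast : ((A.length - 1 : ℕ) : Int) + 1 = (A.length : Int) := by omega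
  rw [hcast] at hd
  rw [hd]

-- ===== VERDICT (by name: the statement is the Claim_ definition above) =====
theorem it_is_wednesday_my_dudes_spec : Claim_equal_it_is_wednesday_my_dudes := by
  intro A _ hPre
  obtain ⟨hne, hm, -, -⟩ := hPre
  unfold Spec_it_is_wednesday_my_dudes
  rw [A_val A hne hm, B_val A hne]
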